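-- pv_equiv track=rewrite | github.com/Pheem49/Proton-T | src/proton_t/core.py | is_fuzzy_match
-- ===== SOURCE A (Python) =====
-- def is_fuzzy_match(keywords, path):
--     """Check if all keywords appear as fuzzy or substring matches in the path."""
--     path_lower = path.lower()
--     for kw in keywords:
--         kw_lower = kw.lower()
--         # Fast substring check first
--         if kw_lower in path_lower: continue
--         # Then character-to-character sequence check (the 'fuzzy' part)
--         it = iter(path_lower)
--         if not all(c in it for c in kw_lower): return False
--     return True
-- ===== SOURCE B (Python) =====
-- def _first_after(idxs, lo, hi, cursor):
--     """First j in [lo, hi) with idxs[j] > cursor (idxs ascending); hi if none."""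
--     if lo >= hi:
--         return lo
--     mid = (lo + hi) // 2
--     if idxs[mid] > cursor:
--         return _first_after(idxs, lo, mid, cursor)
--     else:
--         return _first_after(idxs, mid + 1, hi, cursor)
--
-- def is_fuzzy_match(keywords, path):
--     """Index every character's occurrence positions once, then greedily place
--     each keyword's characters by binary search over those position lists."""
--     path_lower = path.lower()
--     positions = {}
--     for i, ch in enumerate(path_lower):
--         positions.setdefault(ch, []).append(i)
--     for kw in keywords:
--         cursor = -1
--         for c in kw.lower():
--             idxs = positions.get(c, [])
--             j = _first_after(idxs, 0, len(idxs), cursor)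
--             if j == len(idxs):
--                 return False
--             cursor = idxs[j]
--     return True
-- ===== Notes on version B (the rewrite author's own statement) =====
-- stated objective: faster
-- what changed: B drops A's substring fast-path and per-keyword iterator scans: it builds one char-to-occurrence-positions index over the lowered path, then greedily places each keyword character by binary search for the first position past the cursor.
import Mathlib
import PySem

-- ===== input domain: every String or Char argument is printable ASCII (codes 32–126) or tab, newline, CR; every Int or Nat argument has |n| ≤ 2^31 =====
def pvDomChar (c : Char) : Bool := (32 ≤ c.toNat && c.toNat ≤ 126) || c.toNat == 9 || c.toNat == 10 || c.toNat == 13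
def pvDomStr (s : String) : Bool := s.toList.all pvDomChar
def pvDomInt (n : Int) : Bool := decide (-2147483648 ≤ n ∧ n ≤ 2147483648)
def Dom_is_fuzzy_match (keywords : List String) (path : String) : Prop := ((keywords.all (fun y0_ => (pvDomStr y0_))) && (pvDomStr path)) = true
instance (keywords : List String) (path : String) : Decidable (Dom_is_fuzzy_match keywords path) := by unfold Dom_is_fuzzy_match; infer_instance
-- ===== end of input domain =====

-- B replaces A's per-keyword substring check + iterator scan by one occurrence-position
-- index over the path and a binary search per keyword character; same return values.


-- ===== PORT A =====
-- 'c in it' on a list iterator: drop elements up to and including the first c; none = not found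
def pvFindDrop (it : List Char) (c : Char) : Option (List Char) :=
  match it with
  | [] => none
  | x :: rest => if x = c then some rest else pvFindDrop rest c

-- 'all(c in it for c in kw_lower)': consume the iterator character by character
def pvConsume (kw : List Char) (it : List Char) : Bool :=
  match kw with
  | [] => true
  | c :: k =>
    match pvFindDrop it c with
    | none => false
    | some rest => pvConsume k rest

-- the 'for kw in keywords' loop with its early 'return False'
def pvLoopA (keywords : List String) (pathLower : List Char) : Bool :=
  match keywords with
  | [] => true
  | kw :: rest =>
    let kwLower := PySem.Chars.lower kw.toList
    if PySem.Chars.isIn kwLower pathLower then pvLoopA rest pathLower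
    else if pvConsume kwLower pathLower then pvLoopA rest pathLower
    else false

def is_fuzzy_match (keywords : List String) (path : String) : Bool :=
  pvLoopA keywords (PySem.Chars.lower path.toList)

-- ===== PORT B =====
-- _first_after(idxs, lo, hi, cursor): first j in [lo, hi) with idxs[j] > cursor, else hi
def pvFirstAfter (idxs : List Int) (lo hi cursor : Int) : Int :=
  if lo ≥ hi then lo
  else
    let mid := PySem.Int.floordiv (lo + hi) 2
    if PySem.List.pyGetD idxs mid 0 > cursor then pvFirstAfter idxs lo mid cursor
    else pvFirstAfter idxs (mid + 1) hi cursor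
termination_by (hi - lo).toNat
decreasing_by
  · have h1 : lo < hi := by omega
    have hb := PySem.Int.floordiv_two_mid_bounds (le_of_lt h1)
    have h2 : PySem.Int.floordiv (lo + hi) 2 < hi :=
      (PySem.Int.floordiv_lt_iff_lt_mul (by norm_num)).2 (by omega)
    omega
  · have h1 : lo < hi := by omega
    have hb := PySem.Int.floordiv_two_mid_bounds (le_of_lt h1)
    omega

-- 'positions.setdefault(ch, []).append(i)' over 'enumerate(path_lower)'
def pvBuildPos (pl : List Char) : PySem.Dict Char (List Int) :=
  (PySem.List.enumerate pl 0).foldl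
    (fun d p => d.insert p.2 (d.getD p.2 [] ++ [p.1])) PySem.Dict.empty

-- the 'for c in kw.lower()' loop with its early 'return False'
def pvMatchKw (pos : PySem.Dict Char (List Int)) (kw : List Char) (cursor : Int) : Bool :=
  match kw with
  | [] => true
  | c :: k =>
    let idxs := pos.getD c []
    let j := pvFirstAfter idxs 0 (PySem.List.len idxs) cursor
    if j = PySem.List.len idxs then false
    else pvMatchKw pos k (PySem.List.pyGetD idxs j 0)

-- the 'for kw in keywords' loop
def pvLoopB (pos : PySem.Dict Char (List Int)) (keywords : List String) : Bool :=
  match keywords with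
  | [] => true
  | kw :: rest =>
    if pvMatchKw pos (PySem.Chars.lower kw.toList) (-1) then pvLoopB pos rest
    else false

def is_fuzzy_match_alt (keywords : List String) (path : String) : Bool :=
  let pathLower := PySem.Chars.lower path.toList
  pvLoopB (pvBuildPos pathLower) keywords

-- ===== PRECONDITION & SPEC =====
def Spec_is_fuzzy_match (keywords : List String) (path : String) (out : Bool) : Prop := out = is_fuzzy_match_alt keywords path
instance (keywords : List String) (path : String) (out : Bool) : Decidable (Spec_is_fuzzy_match keywords path out) := by unfold Spec_is_fuzzy_match; infer_instance

-- ===== CLAIM (what is proved, stated in full; the proofs are below) =====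
def Claim_equal_is_fuzzy_match : Prop := ∀ (keywords : List String) (path : String), Dom_is_fuzzy_match keywords path → Spec_is_fuzzy_match keywords path (is_fuzzy_match keywords path)

-- ===== LEMMAS AND PROOFS =====

-- positions (k-based) at which character c occurs in s
def pvOcc (s : List Char) (c : Char) (k : Int) : List Int :=
  match s with
  | [] => []
  | x :: t => if x = c then k :: pvOcc t c (k + 1) else pvOcc t c (k + 1)

theorem pvOcc_shift (s : List Char) (c : Char) :
    ∀ k : Int, pvOcc s c k = (pvOcc s c 0).map (· + k) := by
  induction s with
  | nil => intro k; rfl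
  | cons x t ih =>
    intro k
    by_cases hx : x = c
    · simp only [pvOcc, if_pos hx]
      rw [ih (k + 1), ih (0 + 1), List.map_cons, List.map_map, zero_add]
      congr 1
      exact List.map_congr_left (fun a _ => by simp; omega)
    · simp only [pvOcc, if_neg hx]
      rw [ih (k + 1), ih (0 + 1), List.map_map]
      refine List.map_congr_left ?_
      intro a _; simp; omega

theorem pvOcc_append (a b : List Char) (c : Char) :
    ∀ k : Int, pvOcc (a ++ b) c k = pvOcc a c k ++ pvOcc b c (k + a.length) := by
  induction a with
  | nil => intro k; simp [pvOcc]
  | cons x t ih =>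
    intro k
    have h1 : k + 1 + (t.length : Int) = k + ((x :: t).length : Int) := by simp; omega
    by_cases hx : x = c
    · simp only [List.cons_append, pvOcc, if_pos hx, ih (k + 1), h1, List.cons_append]
    · simp only [List.cons_append, pvOcc, if_neg hx, ih (k + 1), h1]

theorem pvOcc_split (pl : List Char) (c : Char) (m : Nat) :
    pvOcc pl c 0 = pvOcc (pl.take m) c 0
      ++ (pvOcc (pl.drop m) c 0).map (· + ((pl.take m).length : Int)) := by
  conv_lhs => rw [← List.take_append_drop m pl]
  rw [pvOcc_append, pvOcc_shift (pl.drop m) c]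
  norm_num

theorem pvOcc_bounds (s : List Char) (c : Char) :
    ∀ (k : Int), ∀ x ∈ pvOcc s c k, k ≤ x ∧ x < k + s.length := by
  induction s with
  | nil => intro k x hx; simp [pvOcc] at hx
  | cons y t ih =>
    intro k x hx
    have hlc : ((y :: t).length : Int) = (t.length : Int) + 1 := by simp
    by_cases hy : y = c
    · simp only [pvOcc, if_pos hy, List.mem_cons] at hx
      rcases hx with rfl | hx
      · omega
      · have h2 := ih (k + 1) x hx; omega
    · simp only [pvOcc, if_neg hy] at hx
      have h2 := ih (k + 1) x hx; omega

theorem pvOcc_nil_iff (s : List Char) (c : Char) :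
    ∀ k : Int, (pvOcc s c k = [] ↔ pvFindDrop s c = none) := by
  induction s with
  | nil => intro k; simp [pvOcc, pvFindDrop]
  | cons x t ih =>
    intro k
    by_cases hx : x = c
    · simp [pvOcc, pvFindDrop, hx]
    · simp only [pvOcc, pvFindDrop, if_neg hx, ih (k + 1)]

theorem pvFindDrop_of_occ (s : List Char) (c : Char) :
    ∀ (t : Int) (rest : List Int), pvOcc s c 0 = t :: rest →
      0 ≤ t ∧ pvFindDrop s c = some (s.drop (t.toNat + 1)) := by
  induction s with
  | nil => intro t rest h; simp [pvOcc] at h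
  | cons x s' ih =>
    intro t rest h
    by_cases hx : x = c
    · simp only [pvOcc, if_pos hx] at h
      obtain ⟨ht, -⟩ := List.cons.inj h
      subst ht
      exact ⟨le_refl 0, by simp [pvFindDrop, hx]⟩
    · simp only [pvOcc, if_neg hx] at h
      rw [show (0 : Int) + 1 = 1 from rfl, pvOcc_shift s' c 1] at h
      cases hocc : pvOcc s' c 0 with
      | nil => rw [hocc] at h; simp at h
      | cons t' rest' =>
        rw [hocc, List.map_cons] at h
        have ht : t' + 1 = t := (List.cons.inj h).1
        obtain ⟨ht'0, hfd⟩ := ih t' rest' hocc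
        refine ⟨by omega, ?_⟩
        have hdr : (x :: s').drop (t.toNat + 1) = s'.drop (t'.toNat + 1) := by
          have h2 : t.toNat = t'.toNat + 1 := by omega
          simp [h2]
        rw [hdr, pvFindDrop, if_neg hx, hfd]

theorem pvBuildPos_getD_gen (c : Char) (pl : List Char) :
    ∀ (k : Int) (d : PySem.Dict Char (List Int)),
      ((PySem.List.enumerate pl k).foldl
          (fun d p => d.insert p.2 (d.getD p.2 [] ++ [p.1])) d).getD c []
        = d.getD c [] ++ pvOcc pl c k := by
  induction pl with
  | nil => intro k d; simp [PySem.List.enumerate_nil, pvOcc]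
  | cons x t ih =>
    intro k d
    rw [PySem.List.enumerate_cons, List.foldl_cons, ih (k + 1)]
    rw [PySem.Dict.getD_insert]
    by_cases hcx : c = x
    · subst hcx; simp [pvOcc]
    · have hxc : ¬ x = c := fun e => hcx e.symm
      simp only [pvOcc, if_neg hcx, if_neg hxc]

theorem pvBuildPos_getD (pl : List Char) (c : Char) :
    (pvBuildPos pl).getD c [] = pvOcc pl c 0 := by
  rw [pvBuildPos, pvBuildPos_getD_gen c pl 0 PySem.Dict.empty]
  simp [PySem.Dict.empty, PySem.Dict.getD, PySem.Dict.get?]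

theorem pvFirstAfter_split (u v : List Int) (cursor : Int)
    (hu : ∀ x ∈ u, x ≤ cursor) (hv : ∀ x ∈ v, cursor < x) :
    ∀ (n : Nat) (lo hi : Int), (hi - lo).toNat ≤ n → 0 ≤ lo → lo ≤ (u.length : Int) →
      (u.length : Int) ≤ hi → hi ≤ (u.length : Int) + (v.length : Int) →
      pvFirstAfter (u ++ v) lo hi cursor = (u.length : Int) := by
  intro n
  induction n with
  | zero =>
    intro lo hi hf h0 h1 h2 h3
    have hle : hi ≤ lo := by omega
    rw [pvFirstAfter, if_pos hle]
    omega
  | succ n ih =>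
    intro lo hi hf h0 h1 h2 h3
    by_cases hlh : lo ≥ hi
    · rw [pvFirstAfter, if_pos hlh]; omega
    · rw [pvFirstAfter, if_neg hlh]
      have hlt : lo < hi := by omega
      have hb := PySem.Int.floordiv_two_mid_bounds (le_of_lt hlt)
      have hmidlt : PySem.Int.floordiv (lo + hi) 2 < hi :=
        (PySem.Int.floordiv_lt_iff_lt_mul (by norm_num)).2 (by omega)
      set mid := PySem.Int.floordiv (lo + hi) 2 with hmid
      have hmen : (u ++ v).length = u.length + v.length := List.length_append ..
      have hget : PySem.List.pyGetD (u ++ v) mid 0 = (u ++ v)[mid.toNat]'(by rw [hmen]; omega) := by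
        apply PySem.List.pyGetD_eq_getElem (u ++ v) 0 (by omega)
        rw [hmen]; push_cast; omega
      by_cases hside : mid < (u.length : Int)
      · -- element of u: ≤ cursor, take else branch, recurse on [mid+1, hi)
        have hmn : mid.toNat < u.length := by omega
        have hel : (u ++ v)[mid.toNat]'(by rw [hmen]; omega) = u[mid.toNat]'hmn :=
          List.getElem_append_left ..
        have hle : PySem.List.pyGetD (u ++ v) mid 0 ≤ cursor := by
          rw [hget, hel]; exact hu _ (List.getElem_mem _)
        rw [if_neg (by omega)]
        exact ih (mid + 1) hi (by omega) (by omega) (by omega) h2 h3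
      · -- element of v: > cursor, take then branch, recurse on [lo, mid)
        have hun : u.length ≤ mid.toNat := by omega
        have hvn : mid.toNat - u.length < v.length := by omega
        have hel : (u ++ v)[mid.toNat]'(by rw [hmen]; omega) = v[mid.toNat - u.length]'hvn :=
          List.getElem_append_right hun
        have hgt : PySem.List.pyGetD (u ++ v) mid 0 > cursor := by
          rw [hget, hel]; exact hv _ (List.getElem_mem _)
        rw [if_pos hgt]
        exact ih lo mid (by omega) h0 h1 (by omega) (by omega)

-- greedy completeness: any sublist of the path is consumed
theorem pvConsume_of_sublist (p kw : List Char) (h : kw.Sublist p) :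
    pvConsume kw p = true := by
  induction p generalizing kw with
  | nil =>
    cases h
    simp [pvConsume]
  | cons x t ih =>
    cases kw with
    | nil => simp [pvConsume]
    | cons c k =>
      by_cases hc : c = x
      · subst hc
        have hk : k.Sublist t := by
          cases h with
          | cons _ h' => exact (List.sublist_cons_self c k).trans h'
          | cons₂ _ h' => exact h'
        simp [pvConsume, pvFindDrop, ih k hk]
      · have h' : (c :: k).Sublist t := by
          cases h with
          | cons _ h' => exact h'
          | cons₂ _ h' => exact absurd rfl hc
        have hx : ¬ x = c := fun e => hc e.symm
        simpa [pvConsume, pvFindDrop, hx] using ih (c :: k) h'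

-- the binary-search matcher is A's iterator consumption, cursor j ↔ suffix drop (j+1)
theorem pvMatchKw_eq_consume (pl : List Char) (kw : List Char) :
    ∀ (j : Int), -1 ≤ j →
      pvMatchKw (pvBuildPos pl) kw j = pvConsume kw (pl.drop (j + 1).toNat) := by
  induction kw with
  | nil => intro j _; rfl
  | cons c k ih =>
    intro j hj
    obtain ⟨m, hmj⟩ : ∃ m : Nat, (m : Int) = j + 1 := ⟨(j + 1).toNat, by omega⟩
    have hmt : (j + 1).toNat = m := by omega
    rw [hmt]
    have hidxs : (pvBuildPos pl).getD c [] = pvOcc pl c 0 := pvBuildPos_getD pl c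
    have hsplit := pvOcc_split pl c m
    have htk : (pl.take m).length = min m pl.length := List.length_take
    have hub : ∀ x ∈ pvOcc (pl.take m) c 0, x ≤ j := by
      intro x hx
      have hb := pvOcc_bounds (pl.take m) c 0 x hx
      omega
    have hvb : ∀ x ∈ (pvOcc (pl.drop m) c 0).map (· + ((pl.take m).length : Int)), j < x := by
      intro x hx
      rcases List.mem_map.1 hx with ⟨y, hy, rfl⟩
      have hb := pvOcc_bounds (pl.drop m) c 0 y hy
      have hld : (pl.drop m).length = pl.length - m := List.length_drop
      omega
    have hfa := pvFirstAfter_split (pvOcc (pl.take m) c 0)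
      ((pvOcc (pl.drop m) c 0).map (· + ((pl.take m).length : Int))) j hub hvb
      ((pvOcc (pl.take m) c 0).length + ((pvOcc (pl.drop m) c 0).map (· + ((pl.take m).length : Int))).length)
      0 (((pvOcc (pl.take m) c 0).length : Int) + (((pvOcc (pl.drop m) c 0).map (· + ((pl.take m).length : Int))).length : Int))
      (by omega) (by omega) (by omega) (by omega) (by omega)
    show (if pvFirstAfter ((pvBuildPos pl).getD c []) 0 (PySem.List.len ((pvBuildPos pl).getD c [])) j
            = PySem.List.len ((pvBuildPos pl).getD c []) then false
          else pvMatchKw (pvBuildPos pl) k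
            (PySem.List.pyGetD ((pvBuildPos pl).getD c [])
              (pvFirstAfter ((pvBuildPos pl).getD c []) 0 (PySem.List.len ((pvBuildPos pl).getD c [])) j) 0))
        = pvConsume (c :: k) (pl.drop m)
    rw [hidxs, hsplit]
    have hlen : PySem.List.len (pvOcc (pl.take m) c 0
          ++ (pvOcc (pl.drop m) c 0).map (· + ((pl.take m).length : Int)))
        = ((pvOcc (pl.take m) c 0).length : Int)
          + (((pvOcc (pl.drop m) c 0).map (· + ((pl.take m).length : Int))).length : Int) := by
      simp [PySem.List.len]
    rw [hlen, hfa]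
    cases hwc : pvOcc (pl.drop m) c 0 with
    | nil =>
      -- no occurrence of c after the cursor: both sides are false
      have hnone := (pvOcc_nil_iff (pl.drop m) c 0).1 hwc
      simp [pvConsume, hnone]
    | cons t rest =>
      obtain ⟨ht0, hfd⟩ := pvFindDrop_of_occ (pl.drop m) c t rest hwc
      have hmlt : m < pl.length := by
        by_contra hc'
        have hdz : pl.drop m = [] := List.drop_eq_nil_of_le (by omega)
        rw [hdz] at hwc; simp [pvOcc] at hwc
      have htkm : ((pl.take m).length : Int) = m := by omega
      rw [if_neg (by simp; omega)]
      have hgetl : PySem.List.pyGetD (pvOcc (pl.take m) c 0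
            ++ (t :: rest).map (· + ((pl.take m).length : Int)))
            ((pvOcc (pl.take m) c 0).length : Int) 0
          = t + ((pl.take m).length : Int) := by
        rw [PySem.List.pyGetD_eq_getElem _ 0 (by omega) (by simp)]
        have h1 : (((pvOcc (pl.take m) c 0).length : Int)).toNat = (pvOcc (pl.take m) c 0).length := by omega
        simp [h1]
      rw [hgetl, ih (t + ((pl.take m).length : Int)) (by omega)]
      have hcons : pvConsume (c :: k) (pl.drop m) = pvConsume k ((pl.drop m).drop (t.toNat + 1)) := by
        simp [pvConsume, hfd]
      have hidx : (t + ((pl.take m).length : Int) + 1).toNat = m + (t.toNat + 1) := by omega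
      rw [hcons, List.drop_drop, hidx]

theorem pvLoopB_eq_loopA (pl : List Char) (keywords : List String) :
    pvLoopB (pvBuildPos pl) keywords = pvLoopA keywords pl := by
  induction keywords with
  | nil => rfl
  | cons kw rest ih =>
    set kl := PySem.Chars.lower kw.toList with hkl
    have hmatch : pvMatchKw (pvBuildPos pl) kl (-1) = pvConsume kl pl := by
      have := pvMatchKw_eq_consume pl kl (-1) (by omega)
      simpa using this
    by_cases hin : PySem.Chars.isIn kl pl = true
    · have hsub : kl.Sublist pl := ((PySem.Chars.isIn_iff_infix kl pl).1 hin).sublist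
      have hcons : pvConsume kl pl = true := pvConsume_of_sublist pl kl hsub
      simp [pvLoopB, pvLoopA, hin, hmatch, hcons, ih, ← hkl]
    · by_cases hcons : pvConsume kl pl = true
      · simp [pvLoopB, pvLoopA, hin, hmatch, hcons, ih, ← hkl]
      · simp [pvLoopB, pvLoopA, hin, hmatch, hcons, ← hkl]

-- ===== VERDICT (by name: the statement is the Claim_ definition above) =====
theorem is_fuzzy_match_spec : Claim_equal_is_fuzzy_match := by
  intro keywords path _
  show is_fuzzy_match keywords path = is_fuzzy_match_alt keywords path
  unfold is_fuzzy_match is_fuzzy_match_alt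
  exact (pvLoopB_eq_loopA (PySem.Chars.lower path.toList) keywords).symm
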